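-- pv_equiv track=rewrite | github.com/thevinduttr/Google-Document-AI-OCR | src/pdf_utils.py | parse_page_mode_input
-- ===== SOURCE A (Python) =====
-- from typing import List
--
-- def parse_page_mode_input(mode: str, user_input: str, total_pages: int) -> List[int]:
--     """
--     mode: 'full' | 'single' | 'range' | 'list'
--     user_input:
--       - single: "5"
--       - range: "3-7"
--       - list: "1,3,8"
--     Returns a 1-indexed unique-sorted page list.
--     """
--     if mode == "full":
--         return list(range(1, total_pages + 1))
--
--     pages: List[int] = []
--     if mode == "single":
--         pages = [int(user_input)]
--     elif mode == "range":
--         start, end = user_input.split("-", 1)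
--         pages = list(range(int(start), int(end) + 1))
--     elif mode == "list":
--         pages = [int(x.strip()) for x in user_input.split(",") if x.strip()]
--     else:
--         raise ValueError("Invalid mode")
--
--     pages = [p for p in pages if 1 <= p <= total_pages]
--     return sorted(list(set(pages)))
-- ===== SOURCE B (Python) =====
-- def parse_page_mode_input(mode, user_input, total_pages):
--     # Same contract as A; raises ValueError on an invalid mode.
--     # Interval modes are answered by a clamped range (no filter/sort pass);
--     # 'list' is answered by scanning the page universe in order against a set.
--     if mode == "list":
--         requested = {int(x.strip()) for x in user_input.split(",") if x.strip()}
--         return [p for p in range(1, total_pages + 1) if p in requested]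
--     if mode == "full":
--         lo, hi = 1, total_pages
--     elif mode == "single":
--         lo = hi = int(user_input)
--     elif mode == "range":
--         s, e = user_input.split("-", 1)
--         lo, hi = int(s), int(e)
--     else:
--         raise ValueError("Invalid mode")
--     return list(range(max(lo, 1), min(hi, total_pages) + 1))
-- ===== Notes on version B (the rewrite author's own statement) =====
-- stated objective: alternative
-- what changed: A builds the raw page list, filters it to bounds, then deduplicates and sorts; B never filters or sorts: full/single/range are returned directly as one clamped range(max(lo,1), min(hi,total)+1), and list mode scans the ordered page universe against a requested set, so the output is sorted-unique by construction.
import Mathlib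
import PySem

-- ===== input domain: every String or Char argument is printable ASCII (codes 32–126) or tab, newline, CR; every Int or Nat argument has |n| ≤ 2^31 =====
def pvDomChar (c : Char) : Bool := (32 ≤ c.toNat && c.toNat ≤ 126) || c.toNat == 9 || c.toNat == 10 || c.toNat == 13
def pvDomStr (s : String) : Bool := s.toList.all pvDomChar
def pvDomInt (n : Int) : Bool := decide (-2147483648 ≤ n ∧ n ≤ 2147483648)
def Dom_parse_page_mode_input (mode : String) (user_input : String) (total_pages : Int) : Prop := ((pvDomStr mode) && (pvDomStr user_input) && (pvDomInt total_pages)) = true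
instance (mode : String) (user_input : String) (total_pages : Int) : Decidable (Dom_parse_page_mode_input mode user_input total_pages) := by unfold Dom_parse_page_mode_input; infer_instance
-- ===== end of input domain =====

-- B replaces A's build-then-filter-then-sorted(set(...)) tail by direct clamped ranges
-- (full/single/range) and an ordered universe scan against a set (list mode); return values only,
-- same ValueError on an invalid mode (outside Pre_).

-- ===== PORT A =====
def parse_page_mode_input (mode : String) (user_input : String) (total_pages : Int) : List Int :=
  if mode = "full" then
    PySem.List.pyRange 1 (total_pages + 1) 1
  else
    let pages : List Int :=
      if mode = "single" then
        [(PySem.Int.ofStr? user_input).getD 0]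
      else if mode = "range" then
        match PySem.Str.splitMax? user_input "-" 1 with
        | some [s, e] =>
            PySem.List.pyRange ((PySem.Int.ofStr? s).getD 0) ((PySem.Int.ofStr? e).getD 0 + 1) 1
        | _ => []  -- unpacking raises: outside Pre_
      else if mode = "list" then
        (((PySem.Str.split? user_input ",").getD []).filter
            (fun x => PySem.Str.strip x ≠ "")).map
          (fun x => (PySem.Int.ofStr? (PySem.Str.strip x)).getD 0)
      else []  -- raise ValueError: outside Pre_
    let pages := pages.filter (fun p => decide (1 ≤ p) && decide (p ≤ total_pages))
    PySem.List.sorted (PySem.Set.ofList pages) (fun p => p) false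

-- ===== PORT B =====
def parse_page_mode_input_alt (mode : String) (user_input : String) (total_pages : Int) : List Int :=
  if mode = "list" then
    let requested : PySem.Set Int :=
      PySem.Set.ofList ((((PySem.Str.split? user_input ",").getD []).filter
          (fun x => PySem.Str.strip x ≠ "")).map
        (fun x => (PySem.Int.ofStr? (PySem.Str.strip x)).getD 0))
    (PySem.List.pyRange 1 (total_pages + 1) 1).filter (fun p => PySem.Set.contains requested p)
  else if mode = "full" then
    PySem.List.pyRange (max 1 1) (min total_pages total_pages + 1) 1
  else if mode = "single" then
    let p := (PySem.Int.ofStr? user_input).getD 0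
    PySem.List.pyRange (max p 1) (min p total_pages + 1) 1
  else if mode = "range" then
    let parts := (PySem.Str.splitMax? user_input "-" 1).getD []
    if parts.length = 2 then
      PySem.List.pyRange (max ((PySem.Int.ofStr? (parts.getD 0 "")).getD 0) 1)
        (min ((PySem.Int.ofStr? (parts.getD 1 "")).getD 0) total_pages + 1) 1
    else []  -- unpacking raises: outside Pre_
  else []  -- raise ValueError: outside Pre_

-- ===== PRECONDITION & SPEC =====
-- Pre_ excludes exactly the inputs on which A raises: an unknown mode (ValueError),
-- an operand int() rejects (ValueError), and a 'range' input without '-' (unpacking ValueError).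
def Pre_parse_page_mode_input (mode : String) (user_input : String) (total_pages : Int) : Prop :=
  mode = "full" ∨
  (mode = "single" ∧ (PySem.Int.ofStr? user_input).isSome = true) ∨
  (mode = "range" ∧
    ((PySem.Str.splitMax? user_input "-" 1).getD []).length = 2 ∧
    (PySem.Int.ofStr? (((PySem.Str.splitMax? user_input "-" 1).getD []).getD 0 "")).isSome = true ∧
    (PySem.Int.ofStr? (((PySem.Str.splitMax? user_input "-" 1).getD []).getD 1 "")).isSome = true) ∨
  (mode = "list" ∧
    (((PySem.Str.split? user_input ",").getD []).all
      (fun x => PySem.Str.strip x = "" ∨ (PySem.Int.ofStr? (PySem.Str.strip x)).isSome)) = true)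
instance (mode : String) (user_input : String) (total_pages : Int) : Decidable (Pre_parse_page_mode_input mode user_input total_pages) := by unfold Pre_parse_page_mode_input; infer_instance

def pvWitness_parse_page_mode_input : String × String × Int := ("range", "2-4", 5)

def Spec_parse_page_mode_input (mode : String) (user_input : String) (total_pages : Int) (out : List Int) : Prop := out = parse_page_mode_input_alt mode user_input total_pages
instance (mode : String) (user_input : String) (total_pages : Int) (out : List Int) : Decidable (Spec_parse_page_mode_input mode user_input total_pages out) := by unfold Spec_parse_page_mode_input; infer_instance

-- ===== CLAIM (what is proved, stated in full; the proofs are below) =====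
def Claim_equal_parse_page_mode_input : Prop := ∀ (mode : String) (user_input : String) (total_pages : Int), Dom_parse_page_mode_input mode user_input total_pages → Pre_parse_page_mode_input mode user_input total_pages → Spec_parse_page_mode_input mode user_input total_pages (parse_page_mode_input mode user_input total_pages)

-- ===== LEMMAS AND PROOFS =====

-- two strictly increasing Int lists with the same members are equal
lemma pv_eq_of_pairwise_lt_of_mem_iff {l1 l2 : List Int}
    (h1 : l1.Pairwise (· < ·)) (h2 : l2.Pairwise (· < ·))
    (hm : ∀ x, x ∈ l1 ↔ x ∈ l2) : l1 = l2 := by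
  have nd1 : l1.Nodup := h1.imp ne_of_lt
  have nd2 : l2.Nodup := h2.imp ne_of_lt
  exact List.Perm.eq_of_pairwise (fun a b _ _ h h' => (lt_asymm h h').elim) h1 h2
    ((List.perm_ext_iff_of_nodup nd1 nd2).mpr hm)

-- sorted(set(pages filtered to [1,total])) is the clamped range, for an arbitrary pages list
lemma pv_tail_eq (pages : List Int) (t : Int) :
    PySem.List.sorted
      (PySem.Set.ofList (pages.filter (fun p => decide (1 ≤ p) && decide (p ≤ t))))
      (fun p => p) false
    = (PySem.List.pyRange 1 (t + 1) 1).filter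
        (fun p => PySem.Set.contains (PySem.Set.ofList pages) p) := by
  apply pv_eq_of_pairwise_lt_of_mem_iff
  · exact PySem.List.sorted_ofList_pairwise_lt _
  · exact (PySem.List.pairwise_lt_pyRange_one 1 (t + 1)).filter _
  · intro x
    simp [PySem.List.mem_sorted, PySem.Set.mem_ofList, List.mem_filter,
      PySem.List.mem_pyRange_one, PySem.Set.contains]
    tauto

-- the same tail on a run pyRange a (b+1) 1 is the clamped range pyRange (max a 1) (min b t + 1) 1
lemma pv_tail_range_eq (a b t : Int) :
    PySem.List.sorted
      (PySem.Set.ofList ((PySem.List.pyRange a (b + 1) 1).filter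
        (fun p => decide (1 ≤ p) && decide (p ≤ t))))
      (fun p => p) false
    = PySem.List.pyRange (max a 1) (min b t + 1) 1 := by
  apply pv_eq_of_pairwise_lt_of_mem_iff
  · exact PySem.List.sorted_ofList_pairwise_lt _
  · exact PySem.List.pairwise_lt_pyRange_one _ _
  · intro x
    simp [PySem.List.mem_sorted, PySem.Set.mem_ofList, List.mem_filter,
      PySem.List.mem_pyRange_one]
    omega

-- ===== VERDICT (by name: the statement is the Claim_ definition above) =====
theorem parse_page_mode_input_spec : Claim_equal_parse_page_mode_input := by
  intro mode user_input total_pages _hdom hpre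
  unfold Spec_parse_page_mode_input parse_page_mode_input parse_page_mode_input_alt
  rcases hpre with hfull | ⟨hs, _⟩ | ⟨hr, hcond⟩ | ⟨hl, _⟩
  · subst hfull
    simp
  · subst hs
    have h1 : ¬ ("single" : String) = "full" := by decide
    have h2 : ¬ ("single" : String) = "list" := by decide
    simp only [if_neg h1, if_neg h2]
    have := pv_tail_range_eq ((PySem.Int.ofStr? user_input).getD 0)
      ((PySem.Int.ofStr? user_input).getD 0) total_pages
    rw [show ([(PySem.Int.ofStr? user_input).getD 0] : List Int)
        = PySem.List.pyRange ((PySem.Int.ofStr? user_input).getD 0)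
            ((PySem.Int.ofStr? user_input).getD 0 + 1) 1
      from (PySem.List.pyRange_one_singleton _).symm]
    exact this
  · subst hr
    have h1 : ¬ ("range" : String) = "full" := by decide
    have h2 : ¬ ("range" : String) = "list" := by decide
    have h3 : ¬ ("range" : String) = "single" := by decide
    simp only [if_neg h1, if_neg h2, if_neg h3]
    obtain ⟨hlen, -, -⟩ := hcond
    cases hsp : PySem.Str.splitMax? user_input "-" 1 with
    | none => rw [hsp] at hlen; simp at hlen
    | some parts =>
      rw [hsp] at hlen
      match parts, hlen with
      | [s, e], _ => simpa using pv_tail_range_eq _ _ _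
  · subst hl
    have h1 : ¬ ("list" : String) = "full" := by decide
    have h3 : ¬ ("list" : String) = "single" := by decide
    have h4 : ¬ ("list" : String) = "range" := by decide
    simp only [if_neg h1, if_neg h3, if_neg h4]
    exact pv_tail_eq _ _
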